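-- pv_equiv track=rewrite | github.com/TeeKay-FourTwentyOne/math | ramsey-book-graphs/qr_perturbation_test.py | cross_check_small
-- ===== SOURCE A (Python) =====
-- def cross_check_small(D11, D12, m):
--     """Full vertex-by-vertex verification for small m (≤ 15)."""
--     if m > 15:
--         return None
--     n = (m + 1) // 2
--     D11_set = set(D11)
--     D12_set = set(D12)
--     D22_set = set(range(1, m)) - D11_set
--
--     def is_red(ub, ui, vb, vi):
--         if ub == vb:
--             d = (ui - vi) % m
--             return d in (D11_set if ub == 0 else D22_set)
--         # Cross-block: convention is d = (V1_index - V2_index)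
--         if ub == 0:
--             d = (ui - vi) % m
--         else:
--             d = (vi - ui) % m
--         return d in D12_set
--
--     max_red_cn = 0
--     max_blue_cn = 0
--     verts = [(b, i) for b in range(2) for i in range(m)]
--
--     for a in range(len(verts)):
--         for b in range(a + 1, len(verts)):
--             u, v = verts[a], verts[b]
--             red_cn = blue_cn = 0
--             for c in range(len(verts)):
--                 w = verts[c]
--                 if w == u or w == v:
--                     continue
--                 r1 = is_red(u[0], u[1], w[0], w[1])
--                 r2 = is_red(v[0], v[1], w[0], w[1])
--                 if r1 and r2:
--                     red_cn += 1
--                 elif not r1 and not r2: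
--                     blue_cn += 1
--             if is_red(u[0], u[1], v[0], v[1]):
--                 max_red_cn = max(max_red_cn, red_cn)
--             else:
--                 max_blue_cn = max(max_blue_cn, blue_cn)
--
--     valid = (max_red_cn <= n - 2) and (max_blue_cn <= n - 1)
--     return valid, max_red_cn, max_blue_cn
-- ===== SOURCE B (Python) =====
-- def cross_check_small(D11, D12, m):
--     """Full vertex-by-vertex verification for small m (<= 15)."""
--     if m > 15:
--         return None
--     n = (m + 1) // 2
--     D11s = set(D11)
--     D12s = set(D12)
--     D22s = set(range(1, m)) - D11s
--     N = 2 * m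
--     # Red-adjacency bitmask per vertex t = (t // m, t % m); bit s set iff edge t->s is red.
--     R = []
--     for t in range(N):
--         tb, ti = divmod(t, m)
--         mask = 0
--         for s in range(N):
--             sb, si = divmod(s, m)
--             if tb == sb:
--                 red = ((ti - si) % m) in (D11s if tb == 0 else D22s)
--             elif tb == 0:
--                 red = ((ti - si) % m) in D12s
--             else:
--                 red = ((si - ti) % m) in D12s
--             if red:
--                 mask |= 1 << s
--         R.append(mask)
--     full = (1 << max(N, 0)) - 1
--     max_red = 0
--     max_blue = 0
--     for a in range(N):
--         ra = R[a]
--         for b in range(a + 1, N):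
--             rb = R[b]
--             ex = full ^ ((1 << a) | (1 << b))
--             if (ra >> b) & 1:
--                 max_red = max(max_red, (ra & rb & ex).bit_count())
--             else:
--                 max_blue = max(max_blue, ((full ^ (ra | rb)) & ex).bit_count())
--     valid = (max_red <= n - 2) and (max_blue <= n - 1)
--     return valid, max_red, max_blue
-- ===== Notes on version B (the rewrite author's own statement) =====
-- stated objective: alternative
-- what changed: Replaces A's per-pair scan over all third vertices (is_red called twice per triple, O(N^3) with N=2m) by precomputed per-vertex red-adjacency bitmasks, counting the common red/blue neighbors of each pair with AND/XOR and popcount (O(N^2) word operations); since m <= 15 the work per call is bounded and large inputs are dominated by building the membership sets, so the measured times are similar.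
import Mathlib
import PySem

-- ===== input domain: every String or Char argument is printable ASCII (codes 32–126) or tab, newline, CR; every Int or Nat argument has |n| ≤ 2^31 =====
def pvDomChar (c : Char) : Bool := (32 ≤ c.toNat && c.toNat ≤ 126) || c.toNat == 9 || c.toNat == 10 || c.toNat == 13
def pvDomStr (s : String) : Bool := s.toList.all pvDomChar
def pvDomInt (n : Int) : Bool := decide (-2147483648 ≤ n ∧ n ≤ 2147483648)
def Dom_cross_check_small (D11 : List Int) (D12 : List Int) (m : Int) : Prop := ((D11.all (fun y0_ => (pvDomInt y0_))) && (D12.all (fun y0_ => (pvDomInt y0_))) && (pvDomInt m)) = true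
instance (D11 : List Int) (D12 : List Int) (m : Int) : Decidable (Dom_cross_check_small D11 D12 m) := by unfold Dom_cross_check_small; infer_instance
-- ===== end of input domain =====

-- B replaces A's per-pair scan over all third vertices by per-vertex red-adjacency bitmasks,
-- counting common red/blue neighbors of a pair via AND/XOR and popcount (alternative algorithm).

-- ===== PORT A =====
-- helper: Python's nested `is_red` closure (set membership is list membership on PySem.Set lists)
def pvIsRed (D11s D22s D12s : List Int) (m ub ui vb vi : Int) : Bool :=
  if ub == vb then
    let d := PySem.Int.mod (ui - vi) m
    if ub == 0 then PySem.Set.contains D11s d else PySem.Set.contains D22s d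
  else
    let d := if ub == 0 then PySem.Int.mod (ui - vi) m else PySem.Int.mod (vi - ui) m
    PySem.Set.contains D12s d

def cross_check_small (D11 : List Int) (D12 : List Int) (m : Int) : Option (Bool × Int × Int) :=
  if m > 15 then none
  else
    let n := PySem.Int.floordiv (m + 1) 2
    let D11s := PySem.Set.ofList D11
    let D12s := PySem.Set.ofList D12
    let D22s := PySem.Set.diff (PySem.Set.ofList (PySem.List.pyRange 1 m 1)) D11s
    let verts := (PySem.List.pyRange 0 2 1).flatMap
      (fun b => (PySem.List.pyRange 0 m 1).map (fun i => (b, i)))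
    let L := PySem.List.len verts
    let st := (PySem.List.pyRange 0 L 1).foldl (fun (acc : Int × Int) a =>
      (PySem.List.pyRange (a + 1) L 1).foldl (fun (acc : Int × Int) b =>
        let u := PySem.List.pyGetD verts a (0, 0)
        let v := PySem.List.pyGetD verts b (0, 0)
        let cnt := (PySem.List.pyRange 0 L 1).foldl (fun (cnt : Int × Int) c =>
          let w := PySem.List.pyGetD verts c (0, 0)
          if w == u || w == v then cnt
          else
            let r1 := pvIsRed D11s D22s D12s m u.1 u.2 w.1 w.2
            let r2 := pvIsRed D11s D22s D12s m v.1 v.2 w.1 w.2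
            if r1 && r2 then (cnt.1 + 1, cnt.2)
            else if !r1 && !r2 then (cnt.1, cnt.2 + 1)
            else cnt) (0, 0)
        if pvIsRed D11s D22s D12s m u.1 u.2 v.1 v.2 then (max acc.1 cnt.1, acc.2)
        else (acc.1, max acc.2 cnt.2)) acc) (0, 0)
    let valid := decide (st.1 ≤ n - 2) && decide (st.2 ≤ n - 1)
    some (valid, st.1, st.2)

-- ===== PORT B =====
def cross_check_small_alt (D11 : List Int) (D12 : List Int) (m : Int) : Option (Bool × Int × Int) :=
  if m > 15 then none
  else
    let n := PySem.Int.floordiv (m + 1) 2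
    let D11s := PySem.Set.ofList D11
    let D12s := PySem.Set.ofList D12
    let D22s := PySem.Set.diff (PySem.Set.ofList (PySem.List.pyRange 1 m 1)) D11s
    -- Python's `range(N)` for N = 2*m enumerates 0,…,N-1 and is empty for m ≤ 0:
    -- ported as List.range (2*m).toNat so the nonnegative masks live in Nat.
    let N := (2 * m).toNat
    let R := (List.range N).map (fun (t : Nat) =>
      let tb := PySem.Int.floordiv (t : Int) m
      let ti := PySem.Int.mod (t : Int) m
      (List.range N).foldl (fun (mask : Nat) (s : Nat) =>
        let sb := PySem.Int.floordiv (s : Int) m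
        let si := PySem.Int.mod (s : Int) m
        let red :=
          if tb == sb then
            if tb == 0 then PySem.Set.contains D11s (PySem.Int.mod (ti - si) m)
            else PySem.Set.contains D22s (PySem.Int.mod (ti - si) m)
          else if tb == 0 then PySem.Set.contains D12s (PySem.Int.mod (ti - si) m)
          else PySem.Set.contains D12s (PySem.Int.mod (si - ti) m)
        if red then mask ||| ((1 : Nat) <<< s) else mask) 0)
    let full := (1 <<< N) - 1
    let st := (List.range N).foldl (fun (acc : Int × Int) a =>
      let ra := R.getD a 0
      (List.range' (a + 1) (N - (a + 1))).foldl (fun (acc : Int × Int) b =>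
        let rb := R.getD b 0
        let ex := full ^^^ ((1 <<< a) ||| (1 <<< b))
        if (ra >>> b) &&& 1 == 1 then
          (max acc.1 (PySem.Int.bitCount ((ra &&& rb &&& ex : Nat) : Int) : Int), acc.2)
        else
          (acc.1, max acc.2 (PySem.Int.bitCount (((full ^^^ (ra ||| rb)) &&& ex : Nat) : Int) : Int)))
        acc) (0, 0)
    let valid := decide (st.1 ≤ n - 2) && decide (st.2 ≤ n - 1)
    some (valid, st.1, st.2)

-- ===== PRECONDITION & SPEC =====
def Spec_cross_check_small (D11 : List Int) (D12 : List Int) (m : Int) (out : Option (Bool × Int × Int)) : Prop := out = cross_check_small_alt D11 D12 m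
instance (D11 : List Int) (D12 : List Int) (m : Int) (out : Option (Bool × Int × Int)) : Decidable (Spec_cross_check_small D11 D12 m out) := by unfold Spec_cross_check_small; infer_instance

-- ===== CLAIM (what is proved, stated in full; the proofs are below) =====
def Claim_equal_cross_check_small : Prop := ∀ (D11 : List Int) (D12 : List Int) (m : Int), Dom_cross_check_small D11 D12 m → Spec_cross_check_small D11 D12 m (cross_check_small D11 D12 m)

-- ===== LEMMAS AND PROOFS =====

-- Proof-side canonical forms (used only by the proofs below).

/-- The red test, index-based: vertex `t` is `(t // m, t % m)`. -/
def pvRed (S1 S22 S12 : List Int) (m : Int) (t s : Nat) : Bool :=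
  let tb := PySem.Int.floordiv (t : Int) m
  let ti := PySem.Int.mod (t : Int) m
  let sb := PySem.Int.floordiv (s : Int) m
  let si := PySem.Int.mod (s : Int) m
  if tb == sb then
    if tb == 0 then PySem.Set.contains S1 (PySem.Int.mod (ti - si) m)
    else PySem.Set.contains S22 (PySem.Int.mod (ti - si) m)
  else if tb == 0 then PySem.Set.contains S12 (PySem.Int.mod (ti - si) m)
  else PySem.Set.contains S12 (PySem.Int.mod (si - ti) m)

def pvMask (S1 S22 S12 : List Int) (m : Int) (N t : Nat) : Nat :=
  (List.range N).foldl (fun (mask : Nat) (s : Nat) =>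
    if pvRed S1 S22 S12 m t s then mask ||| ((1 : Nat) <<< s) else mask) 0

def pvRC (S1 S22 S12 : List Int) (m : Int) (N a b : Nat) : Int :=
  ((List.range N).countP (fun c =>
    !(c == a || c == b) && (pvRed S1 S22 S12 m a c && pvRed S1 S22 S12 m b c)) : Int)

def pvBC (S1 S22 S12 : List Int) (m : Int) (N a b : Nat) : Int :=
  ((List.range N).countP (fun c =>
    !(c == a || c == b) && (!pvRed S1 S22 S12 m a c && !pvRed S1 S22 S12 m b c)) : Int)

/-- Canonical middle form of both double loops. -/
def pvSt (S1 S22 S12 : List Int) (m : Int) (N : Nat) : Int × Int :=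
  (List.range N).foldl (fun (acc : Int × Int) a =>
    (List.range' (a + 1) (N - (a + 1))).foldl (fun (acc : Int × Int) b =>
      if pvRed S1 S22 S12 m a b then (max acc.1 (pvRC S1 S22 S12 m N a b), acc.2)
      else (acc.1, max acc.2 (pvBC S1 S22 S12 m N a b))) acc) (0, 0)

/-- A's `st` computation, verbatim. -/
def pvStA (D11 D12 : List Int) (m : Int) : Int × Int :=
  let D11s := PySem.Set.ofList D11
  let D12s := PySem.Set.ofList D12
  let D22s := PySem.Set.diff (PySem.Set.ofList (PySem.List.pyRange 1 m 1)) D11s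
  let verts := (PySem.List.pyRange 0 2 1).flatMap
    (fun b => (PySem.List.pyRange 0 m 1).map (fun i => (b, i)))
  let L := PySem.List.len verts
  (PySem.List.pyRange 0 L 1).foldl (fun (acc : Int × Int) a =>
    (PySem.List.pyRange (a + 1) L 1).foldl (fun (acc : Int × Int) b =>
      let u := PySem.List.pyGetD verts a (0, 0)
      let v := PySem.List.pyGetD verts b (0, 0)
      let cnt := (PySem.List.pyRange 0 L 1).foldl (fun (cnt : Int × Int) c =>
        let w := PySem.List.pyGetD verts c (0, 0)
        if w == u || w == v then cnt
        else
          let r1 := pvIsRed D11s D22s D12s m u.1 u.2 w.1 w.2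
          let r2 := pvIsRed D11s D22s D12s m v.1 v.2 w.1 w.2
          if r1 && r2 then (cnt.1 + 1, cnt.2)
          else if !r1 && !r2 then (cnt.1, cnt.2 + 1)
          else cnt) (0, 0)
      if pvIsRed D11s D22s D12s m u.1 u.2 v.1 v.2 then (max acc.1 cnt.1, acc.2)
      else (acc.1, max acc.2 cnt.2)) acc) (0, 0)

/-- B's `st` computation, verbatim. -/
def pvStB (D11 D12 : List Int) (m : Int) : Int × Int :=
  let D11s := PySem.Set.ofList D11
  let D12s := PySem.Set.ofList D12
  let D22s := PySem.Set.diff (PySem.Set.ofList (PySem.List.pyRange 1 m 1)) D11s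
  let N := (2 * m).toNat
  let R := (List.range N).map (fun (t : Nat) =>
    let tb := PySem.Int.floordiv (t : Int) m
    let ti := PySem.Int.mod (t : Int) m
    (List.range N).foldl (fun (mask : Nat) (s : Nat) =>
      let sb := PySem.Int.floordiv (s : Int) m
      let si := PySem.Int.mod (s : Int) m
      let red :=
        if tb == sb then
          if tb == 0 then PySem.Set.contains D11s (PySem.Int.mod (ti - si) m)
          else PySem.Set.contains D22s (PySem.Int.mod (ti - si) m)
        else if tb == 0 then PySem.Set.contains D12s (PySem.Int.mod (ti - si) m)
        else PySem.Set.contains D12s (PySem.Int.mod (si - ti) m)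
      if red then mask ||| ((1 : Nat) <<< s) else mask) 0)
  let full := (1 <<< N) - 1
  (List.range N).foldl (fun (acc : Int × Int) a =>
    let ra := R.getD a 0
    (List.range' (a + 1) (N - (a + 1))).foldl (fun (acc : Int × Int) b =>
      let rb := R.getD b 0
      let ex := full ^^^ ((1 <<< a) ||| (1 <<< b))
      if (ra >>> b) &&& 1 == 1 then
        (max acc.1 (PySem.Int.bitCount ((ra &&& rb &&& ex : Nat) : Int) : Int), acc.2)
      else
        (acc.1, max acc.2 (PySem.Int.bitCount (((full ^^^ (ra ||| rb)) &&& ex : Nat) : Int) : Int)))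
      acc) (0, 0)

-- -------- small arithmetic / bit facts --------

theorem pv_isRed_fd (S1 S22 S12 : List Int) (m : Int) (t s : Nat) :
    pvIsRed S1 S22 S12 m (PySem.Int.floordiv (t : Int) m) (PySem.Int.mod (t : Int) m)
      (PySem.Int.floordiv (s : Int) m) (PySem.Int.mod (s : Int) m)
    = pvRed S1 S22 S12 m t s := by
  simp only [pvIsRed, pvRed]
  split_ifs <;> rfl

/-- `(t // m, t % m)` described explicitly for `t < 2m`. -/
theorem pv_desc (m : Int) (t : Nat) (ht : t < (2 * m).toNat) :
    PySem.Int.floordiv (t : Int) m = (if t < m.toNat then (0 : Int) else 1) ∧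
    PySem.Int.mod (t : Int) m = (if t < m.toNat then (t : Int) else (t : Int) - m) := by
  have hm : 0 < m := by omega
  rw [PySem.Int.mod_eq_emod_of_pos hm]
  by_cases h : t < m.toNat
  · simp only [if_pos h]
    constructor
    · rw [PySem.Int.floordiv_eq_iff_of_pos hm]; omega
    · rw [Int.emod_eq_of_lt (by positivity) (by omega)]
  · simp only [if_neg h]
    constructor
    · rw [PySem.Int.floordiv_eq_iff_of_pos hm]; omega
    · have : (t : Int) % m = ((t : Int) - m) % m := by simp [Int.sub_emod_right]
      rw [this, Int.emod_eq_of_lt (by omega) (by omega)]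

theorem pv_fdmd_inj (m : Int) (a c : Nat) (ha : a < (2 * m).toNat) (hc : c < (2 * m).toNat)
    (h1 : PySem.Int.floordiv (c : Int) m = PySem.Int.floordiv (a : Int) m)
    (h2 : PySem.Int.mod (c : Int) m = PySem.Int.mod (a : Int) m) : c = a := by
  obtain ⟨da, ma⟩ := pv_desc m a ha
  obtain ⟨dc, mc⟩ := pv_desc m c hc
  rw [da] at h1
  rw [dc] at h1
  rw [ma] at h2
  rw [mc] at h2
  split_ifs at h1 h2 <;> omega

theorem pv_verts_eq (m : Int) :
    (PySem.List.pyRange 0 2 1).flatMap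
      (fun b => (PySem.List.pyRange 0 m 1).map (fun i => (b, i)))
    = (PySem.List.pyRange 0 m 1).map (fun i => ((0 : Int), i))
      ++ (PySem.List.pyRange 0 m 1).map (fun i => ((1 : Int), i)) := by
  have h : PySem.List.pyRange 0 2 1 = [(0 : Int), 1] := by decide
  rw [h]
  simp

theorem pv_verts_len (m : Int) :
    ((PySem.List.pyRange 0 2 1).flatMap
      (fun b => (PySem.List.pyRange 0 m 1).map (fun i => (b, i)))).length = (2 * m).toNat := by
  rw [pv_verts_eq]
  simp [PySem.List.length_pyRange_one]
  omega

theorem pv_verts_getD (m : Int) (t : Nat) (ht : t < (2 * m).toNat) :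
    ((PySem.List.pyRange 0 2 1).flatMap
      (fun b => (PySem.List.pyRange 0 m 1).map (fun i => (b, i)))).getD t ((0 : Int), (0 : Int))
    = (PySem.Int.floordiv (t : Int) m, PySem.Int.mod (t : Int) m) := by
  have hv : PySem.List.pyRange 0 2 1 = [(0 : Int), 1] := by decide
  rw [hv]
  simp only [List.flatMap_cons, List.flatMap_nil, List.append_nil]
  obtain ⟨hd, hm⟩ := pv_desc m t ht
  rw [hd, hm, List.getD_eq_getElem?_getD]
  have hlen : ((PySem.List.pyRange 0 m 1).map (fun i => ((0 : Int), i))).length = m.toNat := by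
    simp [PySem.List.length_pyRange_one]
  by_cases h : t < m.toNat
  · rw [List.getElem?_append_left (by rw [hlen]; exact h)]
    rw [List.getElem?_map, PySem.List.getElem?_pyRange_one]
    simp only [if_pos (by omega : t < (m - 0).toNat)]
    simp [h]
  · rw [List.getElem?_append_right (by rw [hlen]; omega)]
    rw [List.getElem?_map, PySem.List.getElem?_pyRange_one, hlen]
    simp only [if_pos (by omega : t - m.toNat < (m - 0).toNat)]
    simp [h, Prod.ext_iff]
    omega

theorem pv_testBit_pvMask (S1 S22 S12 : List Int) (m : Int) (N t : Nat) (j : Nat) :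
    (pvMask S1 S22 S12 m N t).testBit j = (decide (j < N) && pvRed S1 S22 S12 m t j) := by
  induction N with
  | zero => simp [pvMask]
  | succ N ih =>
    unfold pvMask at ih ⊢
    rw [List.range_succ, List.foldl_append]
    simp only [List.foldl_cons, List.foldl_nil]
    have hiff : j < N ↔ (j ≠ N ∧ j < N + 1) := by omega
    cases hr : pvRed S1 S22 S12 m t N
    · rw [if_neg (by simp), ih]
      by_cases hj : j = N
      · subst hj; simp [hr]
      · simp [hiff, hj]
    · rw [if_pos rfl, Nat.testBit_or, ih, Nat.one_shiftLeft, Nat.testBit_two_pow]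
      by_cases hj : j = N
      · subst hj; simp [hr]
      · simp [hiff, hj, Ne.symm hj]

/-- popcount = number of set bits below `k`, provided there are none above. -/
theorem pv_popEq (k : Nat) : ∀ x : Nat, (∀ j, k ≤ j → x.testBit j = false) →
    PySem.Int.bitCount (x : Int) = (List.range k).countP x.testBit := by
  induction k with
  | zero =>
    intro x hx
    have : x = 0 := Nat.zero_of_testBit_eq_false (fun i => hx i (Nat.zero_le i))
    subst this
    simp [PySem.Int.bitCount_zero]
  | succ k ih =>
    intro x hx
    rcases Nat.eq_zero_or_pos x with h0 | h0
    · subst h0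
      symm
      simp [PySem.Int.bitCount_zero, List.countP_eq_zero, Nat.zero_testBit]
    · rw [PySem.Int.bitCount_natCast h0,
        ih (x / 2) (fun j hj => by rw [← Nat.testBit_add_one]; exact hx (j + 1) (by omega)),
        List.range_succ_eq_map, List.countP_cons, List.countP_map]
      have hco : List.countP (x.testBit ∘ Nat.succ) (List.range k)
          = List.countP ((x / 2).testBit) (List.range k) :=
        List.countP_congr (fun i _ => by
          simp only [Function.comp_apply, Nat.succ_eq_add_one, Nat.testBit_add_one])
      rw [hco]
      rcases Nat.mod_two_eq_zero_or_one x with h | h <;>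
        simp [Nat.testBit_zero, h, Nat.add_comm]

theorem pv_and_one (x i : Nat) : ((x >>> i) &&& 1 == 1) = x.testBit i := by
  rw [Nat.and_one_is_mod]; simp [Nat.testBit]

/-- A's inner loop over any list, with two disjoint counters. -/
theorem pv_inner_count {γ : Type} (l : List γ) (skip f g : γ → Bool) (x y : Int) :
    l.foldl (fun (cnt : Int × Int) c =>
      if skip c then cnt
      else if f c && g c then (cnt.1 + 1, cnt.2)
      else if !f c && !g c then (cnt.1, cnt.2 + 1)
      else cnt) (x, y)
    = (x + (l.countP (fun c => !skip c && (f c && g c)) : Int),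
       y + (l.countP (fun c => !skip c && (!f c && !g c)) : Int)) := by
  induction l generalizing x y with
  | nil => simp
  | cons c l ih =>
    have hstep : (if skip c then ((x, y) : Int × Int)
        else if f c && g c then ((x, y).1 + 1, (x, y).2)
        else if !f c && !g c then ((x, y).1, (x, y).2 + 1)
        else (x, y))
        = ((if !skip c && (f c && g c) then x + 1 else x),
           (if !skip c && (!f c && !g c) then y + 1 else y)) := by
      cases hs : skip c <;> cases hf : f c <;> cases hg : g c <;> simp_all
    rw [List.foldl_cons, hstep, ih]
    cases hs : skip c <;> cases hf : f c <;> cases hg : g c <;>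
      simp_all [Prod.ext_iff] <;> omega

theorem pv_pair_beq (m : Int) (c a : Nat) (hc : c < (2 * m).toNat) (ha : a < (2 * m).toNat) :
    ((PySem.Int.floordiv (c : Int) m, PySem.Int.mod (c : Int) m)
      == (PySem.Int.floordiv (a : Int) m, PySem.Int.mod (a : Int) m)) = (c == a) := by
  by_cases h : c = a
  · subst h; simp
  · rw [Bool.eq_iff_iff]
    simp only [beq_iff_eq, Prod.mk.injEq]
    constructor
    · rintro ⟨h1, h2⟩
      exact absurd (pv_fdmd_inj m a c ha hc h1 h2) h
    · intro hca
      exact absurd hca h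

theorem pv_pyRange_succ (a N : Nat) :
    PySem.List.pyRange ((a : Int) + 1) (N : Int) 1
    = (List.range (N - (a + 1))).map (fun k => ((a + 1 + k : Nat) : Int)) := by
  rw [PySem.List.pyRange_one]
  have h : (((N : Int)) - ((a : Int) + 1)).toNat = N - (a + 1) := by omega
  rw [h]
  apply List.map_congr_left
  intro k _
  push_cast
  ring

theorem pvStA_eq (D11 D12 : List Int) (m : Int) :
    pvStA D11 D12 m
    = pvSt (PySem.Set.ofList D11)
        (PySem.Set.diff (PySem.Set.ofList (PySem.List.pyRange 1 m 1)) (PySem.Set.ofList D11))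
        (PySem.Set.ofList D12) m (2 * m).toNat := by
  simp only [pvStA, pvSt]
  rw [show PySem.List.len ((PySem.List.pyRange 0 2 1).flatMap
      (fun b => (PySem.List.pyRange 0 m 1).map (fun i => (b, i)))) = (((2 * m).toNat : Nat) : Int) by
    rw [PySem.List.len_eq, pv_verts_len]]
  simp only [PySem.List.pyRange_zero_natCast, pv_pyRange_succ, List.foldl_map,
    List.range'_eq_map_range, PySem.List.pyGetD_natCast]
  apply PySem.List.foldl_congr_mem
  intro acc a ha
  have haN : a < (2 * m).toNat := List.mem_range.mp ha
  apply PySem.List.foldl_congr_mem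
  intro acc' k hk
  have hbN : a + 1 + k < (2 * m).toNat := by
    have := List.mem_range.mp hk; omega
  simp only [pv_verts_getD m a haN, pv_verts_getD m (a + 1 + k) hbN, pv_isRed_fd]
  rw [pv_inner_count]
  by_cases hred : pvRed (PySem.Set.ofList D11)
      ((PySem.Set.ofList (PySem.List.pyRange 1 m 1)).diff (PySem.Set.ofList D11))
      (PySem.Set.ofList D12) m a (a + 1 + k) = true
  · rw [if_pos hred, if_pos hred]
    simp only [zero_add]
    refine congrArg (fun z : Int => (max acc'.1 z, acc'.2)) ?_
    rw [pvRC]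
    congr 1
    apply List.countP_congr
    intro c hc
    have hcN := List.mem_range.mp hc
    simp only [pv_verts_getD m c hcN, pv_isRed_fd, pv_pair_beq m c a hcN haN,
      pv_pair_beq m c (a + 1 + k) hcN hbN]
  · rw [if_neg hred, if_neg hred]
    simp only [zero_add]
    refine congrArg (fun z : Int => (acc'.1, max acc'.2 z)) ?_
    rw [pvBC]
    congr 1
    apply List.countP_congr
    intro c hc
    have hcN := List.mem_range.mp hc
    simp only [pv_verts_getD m c hcN, pv_isRed_fd, pv_pair_beq m c a hcN haN,
      pv_pair_beq m c (a + 1 + k) hcN hbN]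

theorem pv_getD_mask (S1 S22 S12 : List Int) (m : Int) (N t : Nat) (ht : t < N) :
    ((List.range N).map (fun (t : Nat) =>
      let tb := PySem.Int.floordiv (t : Int) m
      let ti := PySem.Int.mod (t : Int) m
      (List.range N).foldl (fun (mask : Nat) (s : Nat) =>
        let sb := PySem.Int.floordiv (s : Int) m
        let si := PySem.Int.mod (s : Int) m
        let red :=
          if tb == sb then
            if tb == 0 then PySem.Set.contains S1 (PySem.Int.mod (ti - si) m)
            else PySem.Set.contains S22 (PySem.Int.mod (ti - si) m)
          else if tb == 0 then PySem.Set.contains S12 (PySem.Int.mod (ti - si) m)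
          else PySem.Set.contains S12 (PySem.Int.mod (si - ti) m)
        if red then mask ||| ((1 : Nat) <<< s) else mask) 0)).getD t 0
    = pvMask S1 S22 S12 m N t := by
  rw [List.getD_eq_getElem?_getD, List.getElem?_map, List.getElem?_range ht]
  rfl

theorem pv_bitCount_red (S1 S22 S12 : List Int) (m : Int) (N a b : Nat)
    (_haN : a < N) (_hbN : b < N) :
    (PySem.Int.bitCount ((pvMask S1 S22 S12 m N a &&& pvMask S1 S22 S12 m N b
        &&& (((1 : Nat) <<< N) - 1 ^^^ (((1 : Nat) <<< a) ||| ((1 : Nat) <<< b))) : Nat) : Int) : Int)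
    = pvRC S1 S22 S12 m N a b := by
  have hhigh : ∀ j, N ≤ j → (pvMask S1 S22 S12 m N a &&& pvMask S1 S22 S12 m N b
      &&& (((1 : Nat) <<< N) - 1 ^^^ (((1 : Nat) <<< a) ||| ((1 : Nat) <<< b)))).testBit j = false := by
    intro j hj
    simp [Nat.testBit_and, Nat.testBit_xor, Nat.testBit_or, Nat.one_shiftLeft,
      Nat.testBit_two_pow, Nat.testBit_two_pow_sub_one, pv_testBit_pvMask]
    exact fun h => absurd h (by omega)
  rw [pv_popEq N _ hhigh, pvRC]
  congr 1
  apply List.countP_congr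
  intro c hc
  have hcN := List.mem_range.mp hc
  simp [Nat.testBit_and, Nat.testBit_xor, Nat.testBit_or, Nat.one_shiftLeft,
    Nat.testBit_two_pow, Nat.testBit_two_pow_sub_one, pv_testBit_pvMask, hcN]
  constructor
  · rintro ⟨⟨r1, r2⟩, n1, n2⟩
    exact ⟨⟨fun h => n1 h.symm, fun h => n2 h.symm⟩, r1, r2⟩
  · rintro ⟨⟨n1, n2⟩, r1, r2⟩
    exact ⟨⟨r1, r2⟩, fun h => n1 h.symm, fun h => n2 h.symm⟩

theorem pv_bitCount_blue (S1 S22 S12 : List Int) (m : Int) (N a b : Nat)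
    (_haN : a < N) (_hbN : b < N) :
    (PySem.Int.bitCount ((((((1 : Nat) <<< N) - 1 ^^^ (pvMask S1 S22 S12 m N a ||| pvMask S1 S22 S12 m N b))
        &&& (((1 : Nat) <<< N) - 1 ^^^ (((1 : Nat) <<< a) ||| ((1 : Nat) <<< b)))) : Nat) : Int) : Int)
    = pvBC S1 S22 S12 m N a b := by
  have hhigh : ∀ j, N ≤ j → ((((1 : Nat) <<< N) - 1 ^^^ (pvMask S1 S22 S12 m N a ||| pvMask S1 S22 S12 m N b))
      &&& (((1 : Nat) <<< N) - 1 ^^^ (((1 : Nat) <<< a) ||| ((1 : Nat) <<< b)))).testBit j = false := by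
    intro j hj
    simp [Nat.testBit_and, Nat.testBit_xor, Nat.testBit_or, Nat.one_shiftLeft,
      Nat.testBit_two_pow, Nat.testBit_two_pow_sub_one, pv_testBit_pvMask]
    intro h
    exact absurd (by rw [decide_eq_false (by omega : ¬ j < N)]; simp) h
  rw [pv_popEq N _ hhigh, pvBC]
  congr 1
  apply List.countP_congr
  intro c hc
  have hcN := List.mem_range.mp hc
  simp [Nat.testBit_and, Nat.testBit_xor, Nat.testBit_or, Nat.one_shiftLeft,
    Nat.testBit_two_pow, Nat.testBit_two_pow_sub_one, pv_testBit_pvMask, hcN]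
  constructor
  · rintro ⟨⟨r1, r2⟩, n1, n2⟩
    exact ⟨⟨fun h => n1 h.symm, fun h => n2 h.symm⟩, r1, r2⟩
  · rintro ⟨⟨n1, n2⟩, r1, r2⟩
    exact ⟨⟨r1, r2⟩, fun h => n1 h.symm, fun h => n2 h.symm⟩

theorem pvStB_eq (D11 D12 : List Int) (m : Int) :
    pvStB D11 D12 m
    = pvSt (PySem.Set.ofList D11)
        (PySem.Set.diff (PySem.Set.ofList (PySem.List.pyRange 1 m 1)) (PySem.Set.ofList D11))
        (PySem.Set.ofList D12) m (2 * m).toNat := by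
  simp only [pvStB, pvSt]
  apply PySem.List.foldl_congr_mem
  intro acc a ha
  have haN : a < (2 * m).toNat := List.mem_range.mp ha
  apply PySem.List.foldl_congr_mem
  intro acc' b hb
  have hbN : b < (2 * m).toNat := by
    have := List.mem_range'_1.mp hb; omega
  rw [pv_getD_mask _ _ _ _ _ _ haN, pv_getD_mask _ _ _ _ _ _ hbN]
  rw [pv_and_one, pv_testBit_pvMask, decide_eq_true hbN, Bool.true_and]
  by_cases hr : pvRed (PySem.Set.ofList D11)
      (PySem.Set.diff (PySem.Set.ofList (PySem.List.pyRange 1 m 1)) (PySem.Set.ofList D11))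
      (PySem.Set.ofList D12) m a b = true
  · rw [if_pos hr, if_pos hr, pv_bitCount_red _ _ _ _ _ _ _ haN hbN]
  · rw [if_neg hr, if_neg hr, pv_bitCount_blue _ _ _ _ _ _ _ haN hbN]

theorem pvSt_AB (D11 D12 : List Int) (m : Int) : pvStA D11 D12 m = pvStB D11 D12 m := by
  rw [pvStA_eq, pvStB_eq]

-- ===== VERDICT (by name: the statement is the Claim_ definition above) =====
theorem cross_check_small_spec : Claim_equal_cross_check_small := by
  intro D11 D12 m _
  unfold Spec_cross_check_small cross_check_small cross_check_small_alt
  by_cases h : m > 15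
  · rw [if_pos h, if_pos h]
  · rw [if_neg h, if_neg h]
    exact congrArg (fun st : Int × Int =>
      some ((decide (st.1 ≤ PySem.Int.floordiv (m + 1) 2 - 2)
             && decide (st.2 ≤ PySem.Int.floordiv (m + 1) 2 - 1) : Bool), st.1, st.2))
      (pvSt_AB D11 D12 m)
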